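-- pv_equiv track=rewrite | github.com/gcvalderrama/python_foundations | DailyCodingProblem/kdistinctsubstring.py | right
-- ===== SOURCE A (Python) =====
-- def count_unique(word):
--     return len(set(word))
--
-- def right(word, budget, k, pos):
--     if not (0 <= pos < len(word)):
--         return budget
--     if word[pos] in budget:
--         budget += word[pos]
--         return right(word, budget, k, pos + 1)
--     if count_unique(budget) == k:
--         return budget
--     else:
--         budget += word[pos]
--         return right(word, budget, k, pos + 1)
-- ===== SOURCE B (Python) =====
-- def right(word, budget, k, pos):
--     # Iterative single pass maintaining the set of distinct chars seen so far,
--     # instead of re-deriving set(budget) and scanning budget at every step.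
--     if pos < 0:
--         return budget
--     seen = set(budget)
--     out = list(budget)
--     for c in word[pos:]:
--         if c not in seen and len(seen) == k:
--             return "".join(out)
--         out.append(c)
--         seen.add(c)
--     return "".join(out)
-- ===== Notes on version B (the rewrite author's own statement) =====
-- stated objective: faster
-- what changed: Replaced the structural recursion that rescans budget and recomputes set(budget) at every step with one iterative pass over word[pos:] that maintains the distinct-character set and a list accumulator.
import Mathlib
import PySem

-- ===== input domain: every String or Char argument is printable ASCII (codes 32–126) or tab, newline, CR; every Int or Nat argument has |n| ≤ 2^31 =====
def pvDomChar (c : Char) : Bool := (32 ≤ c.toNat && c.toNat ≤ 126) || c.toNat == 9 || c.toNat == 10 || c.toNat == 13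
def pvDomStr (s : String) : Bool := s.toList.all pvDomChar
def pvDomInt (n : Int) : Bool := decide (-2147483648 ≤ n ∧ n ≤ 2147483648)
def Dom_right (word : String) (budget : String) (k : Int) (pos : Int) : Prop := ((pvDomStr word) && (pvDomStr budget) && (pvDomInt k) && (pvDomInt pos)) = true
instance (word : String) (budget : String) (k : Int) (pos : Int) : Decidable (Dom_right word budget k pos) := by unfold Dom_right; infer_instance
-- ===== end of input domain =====

-- B replaces A's recursion (which rescans budget and recomputes set(budget) each step)
-- with one iterative pass that maintains the distinct-character set; return value only.

-- ===== PORT A =====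
-- len(set(word))
def countUnique (word : List Char) : Int := ((PySem.Set.ofList word).length : Int)

def rightGo (word budget : List Char) (k : Int) (pos : Int) : List Char :=
  if h : ¬ (0 ≤ pos ∧ pos < (word.length : Int)) then budget
  else
    -- word[pos]: index proven in range by the guard, so pyGetD is exact here
    let c := PySem.List.pyGetD word pos ' '
    if c ∈ budget then rightGo word (budget ++ [c]) k (pos + 1)
    else if countUnique budget = k then budget
    else rightGo word (budget ++ [c]) k (pos + 1)
termination_by ((word.length : Int) - pos).toNat
decreasing_by all_goals (simp at h; omega)

def right (word : String) (budget : String) (k : Int) (pos : Int) : String :=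
  String.ofList (rightGo word.toList budget.toList k pos)

-- ===== PORT B =====
-- the for-loop over word[pos:] with accumulator `out` and the maintained set `seen`
def rightAltGo (rest : List Char) (out : List Char) (seen : PySem.Set Char) (k : Int) : List Char :=
  match rest with
  | [] => out
  | c :: cs =>
    if ¬ (seen.contains c = true) ∧ (seen.length : Int) = k then out
    else rightAltGo cs (out ++ [c]) (seen.add c) k

def right_alt (word : String) (budget : String) (k : Int) (pos : Int) : String :=
  if pos < 0 then budget
  else
    -- word[pos:] with pos ≥ 0 is exactly drop pos.toNat
    String.ofList (rightAltGo (word.toList.drop pos.toNat) budget.toList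
      (PySem.Set.ofList budget.toList) k)

-- ===== PRECONDITION & SPEC =====
def Spec_right (word : String) (budget : String) (k : Int) (pos : Int) (out : String) : Prop := out = right_alt word budget k pos
instance (word : String) (budget : String) (k : Int) (pos : Int) (out : String) : Decidable (Spec_right word budget k pos out) := by unfold Spec_right; infer_instance

-- ===== CLAIM (what is proved, stated in full; the proofs are below) =====
def Claim_equal_right : Prop := ∀ (word : String) (budget : String) (k : Int) (pos : Int), Dom_right word budget k pos → Spec_right word budget k pos (right word budget k pos)

-- ===== LEMMAS AND PROOFS =====

lemma rightGo_eq_alt (word : List Char) :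
    ∀ (n : Nat) (pos : Int) (budget : List Char) (k : Int), 0 ≤ pos →
      word.length - pos.toNat = n →
      rightGo word budget k pos
        = rightAltGo (word.drop pos.toNat) budget (PySem.Set.ofList budget) k := by
  intro n
  induction n with
  | zero =>
    intro pos budget k h0 hn
    have hge : word.length ≤ pos.toNat := by omega
    rw [List.drop_eq_nil_of_le hge]
    rw [rightGo]
    rw [dif_pos (by push_neg; intro _; omega)]
    rfl
  | succ m ih =>
    intro pos budget k h0 hn
    have hlt : pos.toNat < word.length := by omega
    have hdrop : word.drop pos.toNat = word[pos.toNat] :: word.drop (pos.toNat + 1) :=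
      (List.getElem_cons_drop hlt).symm
    have hc : PySem.List.pyGetD word pos ' ' = word[pos.toNat] := by
      conv_lhs => rw [show pos = ((pos.toNat : Nat) : Int) from by omega]
      rw [PySem.List.pyGetD_natCast]
      exact List.getD_eq_getElem _ _ hlt
    set c := word[pos.toNat] with hcdef
    have hpos1 : (pos + 1).toNat = pos.toNat + 1 := by omega
    have hstep : rightGo word (budget ++ [c]) k (pos + 1)
        = rightAltGo (word.drop (pos.toNat + 1)) (budget ++ [c])
            (PySem.Set.add (PySem.Set.ofList budget) c) k := by
      rw [ih (pos + 1) (budget ++ [c]) k (by omega) (by omega), hpos1,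
        PySem.Set.ofList_append_singleton]
    rw [rightGo, dif_neg (by push_neg; exact ⟨h0, by omega⟩), hdrop, rightAltGo]
    simp only [hc]
    by_cases hmem : c ∈ budget
    · rw [if_pos hmem]
      have hcon : PySem.Set.contains (PySem.Set.ofList budget) c = true := by
        rw [PySem.Set.contains_iff, PySem.Set.mem_ofList]; exact hmem
      rw [if_neg (fun h => h.1 hcon)]
      exact hstep
    · rw [if_neg hmem]
      have hcon : PySem.Set.contains (PySem.Set.ofList budget) c = false := by
        rw [Bool.eq_false_iff]
        intro h; rw [PySem.Set.contains_iff, PySem.Set.mem_ofList] at h; exact hmem h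
      by_cases hk : countUnique budget = k
      · rw [if_pos hk]
        rw [if_pos ⟨by rw [hcon]; exact Bool.false_ne_true, hk⟩]
      · rw [if_neg hk]
        rw [if_neg (by rintro ⟨-, h2⟩; exact hk h2)]
        exact hstep

-- ===== VERDICT (by name: the statement is the Claim_ definition above) =====
theorem right_spec : Claim_equal_right := by
  intro word budget k pos _
  unfold Spec_right right right_alt
  by_cases hneg : pos < 0
  · rw [if_pos hneg, rightGo, dif_pos (by push_neg; intro h; omega)]
    exact String.ofList_toList
  · rw [if_neg hneg,
      rightGo_eq_alt word.toList (word.toList.length - pos.toNat) pos budget.toList k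
        (by omega) rfl]
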